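-- pv_equiv track=rewrite | github.com/ozlerhakan/markov-chain | markov.py | get_table_with_enumerate
-- ===== SOURCE A (Python) =====
-- def get_table_with_enumerate(line):
--     '''This is a method using enumerate()
--     '''
--     results = {}
--     for i,c in enumerate(line):
--         try:
--            out = line[i + 1]
--         except IndexError:
--            break
--         char_dict = results.get(c, {})
--         char_dict.setdefault(out, 0)
--         char_dict[out] += 1
--         results[c] = char_dict
--     return results
-- ===== SOURCE B (Python) =====
-- def get_table_with_enumerate(line):
--     '''Two-stage decomposition: first count adjacent pairs in a flat
--     table keyed by (char, next_char), then regroup that table into the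
--     nested dict-of-dicts.'''
--     counts = {}
--     for pair in zip(line, line[1:]):
--         counts[pair] = counts.get(pair, 0) + 1
--     results = {}
--     for (c, out), n in counts.items():
--         results.setdefault(c, {})[out] = n
--     return results
-- ===== Notes on version B (the rewrite author's own statement) =====
-- stated objective: alternative
-- what changed: B replaces A's single indexed enumerate/try-IndexError pass that updates the nested dict incrementally with a two-stage decomposition: first a flat count table keyed by adjacent (char, next) pairs built from zip(line, line[1:]), then a second pass regrouping that table into the nested dict-of-dicts.
import Mathlib
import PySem

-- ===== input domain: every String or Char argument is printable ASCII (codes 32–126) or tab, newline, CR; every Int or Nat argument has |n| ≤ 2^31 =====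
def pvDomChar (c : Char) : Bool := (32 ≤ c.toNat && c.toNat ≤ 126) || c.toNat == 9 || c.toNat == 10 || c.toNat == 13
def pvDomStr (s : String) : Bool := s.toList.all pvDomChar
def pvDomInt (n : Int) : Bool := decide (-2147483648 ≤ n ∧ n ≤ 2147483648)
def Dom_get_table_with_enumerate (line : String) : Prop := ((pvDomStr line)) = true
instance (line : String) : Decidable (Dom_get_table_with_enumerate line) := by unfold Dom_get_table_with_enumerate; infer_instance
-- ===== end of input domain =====

-- B builds a flat (char, next) pair-count table first and regroups it afterwards,
-- instead of A's single indexed pass updating the nested dict; objective: alternative decomposition.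

-- Python iterates a str yielding length-1 strings: Char → String
def pvStr1 (c : Char) : String := String.ofList [c]

-- ===== PORT A =====
-- the 'for i,c in enumerate(line)' loop; 'break' on IndexError returns the accumulated results
def pvALoop (chars : List Char) (results : PySem.Dict String (PySem.Dict String Int)) :
    List (Int × Char) → PySem.Dict String (PySem.Dict String Int)
  | [] => results
  | (i, c) :: rest =>
    match PySem.Chars.pyGet? chars (i + 1) with
    | none => results        -- except IndexError: break
    | some out =>
      let char_dict := results.getD (pvStr1 c) PySem.Dict.empty
      let char_dict := char_dict.setdefault (pvStr1 out) 0
      let char_dict := char_dict.insert (pvStr1 out) (char_dict.getD (pvStr1 out) 0 + 1)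
      pvALoop chars (results.insert (pvStr1 c) char_dict) rest

def get_table_with_enumerate (line : String) : List (String × List (String × Int)) :=
  (pvALoop line.toList PySem.Dict.empty (PySem.List.enumerate line.toList)).items.map
    (fun e => (e.1, e.2.items))

-- ===== PORT B =====
-- body of B's second loop: results.setdefault(c, {})[out] = n
def pvStepB (results : PySem.Dict String (PySem.Dict String Int))
    (e : (String × String) × Int) : PySem.Dict String (PySem.Dict String Int) :=
  let d := results.setdefault e.1.1 PySem.Dict.empty
  d.insert e.1.1 ((d.getD e.1.1 PySem.Dict.empty).insert e.1.2 e.2)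

def get_table_with_enumerate_alt (line : String) : List (String × List (String × Int)) :=
  let chars := line.toList
  -- zip(line, line[1:]) : line[1:] is the tail
  let pairs := (chars.zip (chars.drop 1)).map (fun p => (pvStr1 p.1, pvStr1 p.2))
  -- counts[pair] = counts.get(pair, 0) + 1
  let counts := pairs.foldl (fun d p => d.insert p (d.getD p 0 + 1)) PySem.Dict.empty
  let results := counts.items.foldl pvStepB PySem.Dict.empty
  results.items.map (fun e => (e.1, e.2.items))

-- ===== PRECONDITION & SPEC =====
def Spec_get_table_with_enumerate (line : String) (out : List (String × List (String × Int))) : Prop := out = get_table_with_enumerate_alt line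
instance (line : String) (out : List (String × List (String × Int))) : Decidable (Spec_get_table_with_enumerate line out) := by unfold Spec_get_table_with_enumerate; infer_instance

-- ===== CLAIM (what is proved, stated in full; the proofs are below) =====
def Claim_equal_get_table_with_enumerate : Prop := ∀ (line : String), Dom_get_table_with_enumerate line → Spec_get_table_with_enumerate line (get_table_with_enumerate line)

-- ===== LEMMAS AND PROOFS =====

-- proof-side view of one update: put value w at the nested key path p.1 / p.2
def pvPut (d : PySem.Dict String (PySem.Dict String Int)) (p : String × String) (w : Int) :
    PySem.Dict String (PySem.Dict String Int) :=
  d.insert p.1 ((d.getD p.1 PySem.Dict.empty).insert p.2 w)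

-- proof-side view of A's loop body
def pvStepA (d : PySem.Dict String (PySem.Dict String Int)) (p : String × String) :
    PySem.Dict String (PySem.Dict String Int) :=
  pvPut d p ((d.getD p.1 PySem.Dict.empty).getD p.2 0 + 1)

theorem pv_setdefault_insert {κ ν : Type} [BEq κ] [LawfulBEq κ] (d : PySem.Dict κ ν) (k : κ) (v₀ v : ν) :
    (d.setdefault k v₀).insert k v = d.insert k v := by
  by_cases h : d.contains k = true
  · rw [PySem.Dict.setdefault_of_contains d v₀ h]
  · rw [PySem.Dict.setdefault_of_not_contains d v₀ (by simpa using h),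
      PySem.Dict.insert_insert_self]

theorem pv_stepB_eq (d : PySem.Dict String (PySem.Dict String Int)) (e : (String × String) × Int) :
    pvStepB d e = pvPut d e.1 e.2 := by
  simp [pvStepB, pvPut, pv_setdefault_insert, PySem.Dict.getD_setdefault_self]

theorem pv_put_put_self (d : PySem.Dict String (PySem.Dict String Int))
    (p : String × String) (w w' : Int) : pvPut (pvPut d p w) p w' = pvPut d p w' := by
  simp [pvPut, PySem.Dict.getD_insert_self, PySem.Dict.insert_insert_self]

-- two inserts at distinct keys commute on the items list when the first key is already present
theorem pv_insert_comm_of_contains {κ ν : Type} [BEq κ] [LawfulBEq κ]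
    (d : PySem.Dict κ ν) {k k' : κ} (v v' : ν) (hk : d.contains k = true) (hne : k' ≠ k) :
    (d.insert k v).insert k' v' = (d.insert k' v').insert k v := by
  apply PySem.Dict.ext
  by_cases hk' : d.contains k' = true
  · rw [PySem.Dict.items_insert_of_contains _ v' (by rw [PySem.Dict.contains_insert]; simp [hk']),
      PySem.Dict.items_insert_of_contains _ v hk,
      PySem.Dict.items_insert_of_contains _ v (by rw [PySem.Dict.contains_insert]; simp [hk]),
      PySem.Dict.items_insert_of_contains _ v' hk']
    rw [List.map_map, List.map_map]
    apply List.map_congr_left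
    intro p _
    by_cases h1 : p.1 = k <;> by_cases h2 : p.1 = k' <;>
      simp_all [Function.comp, Ne.symm hne]
  · rw [PySem.Dict.items_insert_of_not_contains _ v'
        (by rw [PySem.Dict.contains_insert]; simp [hk', beq_eq_false_iff_ne.mpr hne]),
      PySem.Dict.items_insert_of_contains _ v hk,
      PySem.Dict.items_insert_of_contains _ v
        (by rw [PySem.Dict.contains_insert]; simp [hk]),
      PySem.Dict.items_insert_of_not_contains _ v' (by simpa using hk')]
    rw [List.map_append]
    simp [beq_eq_false_iff_ne.mpr hne]

-- pvPut at distinct pair keys commutes when p's full path is already present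
theorem pv_put_comm (d : PySem.Dict String (PySem.Dict String Int))
    {p q : String × String} (w u : Int) (hne : q ≠ p)
    (h1 : d.contains p.1 = true)
    (h2 : (d.getD p.1 PySem.Dict.empty).contains p.2 = true) :
    pvPut (pvPut d p w) q u = pvPut (pvPut d q u) p w := by
  by_cases hk : q.1 = p.1
  · have hk2 : q.2 ≠ p.2 := by
      intro h; exact hne (Prod.ext hk h)
    simp only [pvPut, hk, PySem.Dict.getD_insert_self, PySem.Dict.insert_insert_self]
    rw [pv_insert_comm_of_contains _ _ _ h2 hk2]
  · simp only [pvPut,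
      PySem.Dict.getD_insert_of_ne _ _ _ hk,
      PySem.Dict.getD_insert_of_ne _ _ _ (Ne.symm hk)]
    rw [pv_insert_comm_of_contains _ _ _ h1 hk]

-- a pvPut preserves presence of an untouched pair path
theorem pv_put_preserves_contains (d : PySem.Dict String (PySem.Dict String Int))
    {p q : String × String} (u : Int)
    (h1 : d.contains p.1 = true)
    (h2 : (d.getD p.1 PySem.Dict.empty).contains p.2 = true) :
    (pvPut d q u).contains p.1 = true ∧
      ((pvPut d q u).getD p.1 PySem.Dict.empty).contains p.2 = true := by
  constructor
  · rw [pvPut, PySem.Dict.contains_insert]; simp [h1]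
  · by_cases hk : q.1 = p.1
    · rw [pvPut, hk, PySem.Dict.getD_insert_self, PySem.Dict.contains_insert]; simp [h2]
    · rw [pvPut, PySem.Dict.getD_insert_of_ne _ _ _ (Ne.symm hk)]; exact h2

-- a later stepB-fold over other keys commutes with overwriting p's value
theorem pv_fold_put (L : List ((String × String) × Int))
    (D : PySem.Dict String (PySem.Dict String Int)) (p : String × String) (w' : Int)
    (hL : p ∉ L.map Prod.fst)
    (h1 : D.contains p.1 = true)
    (h2 : (D.getD p.1 PySem.Dict.empty).contains p.2 = true) :
    List.foldl pvStepB (pvPut D p w') L = pvPut (List.foldl pvStepB D L) p w' := by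
  induction L generalizing D with
  | nil => rfl
  | cons e L' ih =>
    have hne : e.1 ≠ p := by
      intro h; exact hL (by simp [← h])
    have hL' : p ∉ L'.map Prod.fst := fun h => hL (by simp [h])
    obtain ⟨h1', h2'⟩ := pv_put_preserves_contains D e.2 h1 h2
    calc List.foldl pvStepB (pvPut D p w') (e :: L')
        = List.foldl pvStepB (pvPut (pvPut D p w') e.1 e.2) L' := by
          rw [List.foldl_cons, pv_stepB_eq]
      _ = List.foldl pvStepB (pvPut (pvPut D e.1 e.2) p w') L' := by
          rw [pv_put_comm D w' e.2 hne h1 h2]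
      _ = pvPut (List.foldl pvStepB (pvPut D e.1 e.2) L') p w' := ih _ hL' h1' h2'
      _ = pvPut (List.foldl pvStepB D (e :: L')) p w' := by
          rw [List.foldl_cons, pv_stepB_eq]

-- the nested value under A's fold is the pair count
theorem pv_stepA_count (ps : List (String × String)) (p : String × String) :
    ((List.foldl pvStepA PySem.Dict.empty ps).getD p.1 PySem.Dict.empty).getD p.2 0
      = ps.count p := by
  induction ps using List.reverseRecOn generalizing p with
  | nil => simp [PySem.Dict.getD_empty]
  | append_singleton ps q ih =>
    rw [List.foldl_append, List.foldl_cons, List.foldl_nil]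
    simp only [pvStepA, pvPut]
    by_cases hk : p.1 = q.1
    · by_cases hk2 : p.2 = q.2
      · have hpq : p = q := Prod.ext hk hk2
        subst hpq
        rw [PySem.Dict.getD_insert_self, PySem.Dict.getD_insert_self, ih]
        simp [List.count_append]
      · rw [hk, PySem.Dict.getD_insert_self, PySem.Dict.getD_insert_of_ne _ _ _ hk2, ← hk, ih]
        have : p ≠ q := by intro h; exact hk2 (by rw [h])
        simp [List.count_append, Ne.symm this]
    · rw [PySem.Dict.getD_insert_of_ne _ _ _ hk, ih]
      have : p ≠ q := by intro h; exact hk (by rw [h])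
      simp [List.count_append, Ne.symm this]

-- MAIN: A's incremental nested fold equals B's regroup of the counted pair table
theorem pv_main (pairs : List (String × String)) :
    List.foldl pvStepA PySem.Dict.empty pairs
      = List.foldl pvStepB PySem.Dict.empty
          ((PySem.Set.ofList pairs).map (fun k => (k, (pairs.count k : Int)))) := by
  induction pairs using List.reverseRecOn with
  | nil => rfl
  | append_singleton ps p ih =>
    have hofs : PySem.Set.ofList (ps ++ [p]) = PySem.Set.add (PySem.Set.ofList ps) p := by
      rw [PySem.Set.ofList_eq_foldl, List.foldl_append, List.foldl_cons, List.foldl_nil,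
        ← PySem.Set.ofList_eq_foldl]
    have hstep : List.foldl pvStepA PySem.Dict.empty (ps ++ [p])
        = pvPut (List.foldl pvStepA PySem.Dict.empty ps) p (ps.count p + 1) := by
      rw [List.foldl_append, List.foldl_cons, List.foldl_nil]
      simp only [pvStepA]
      rw [pv_stepA_count]
    by_cases hp : p ∈ ps
    · -- p already counted: the table keeps its shape, only p's count grows by one
      have hps : p ∈ PySem.Set.ofList ps := (PySem.Set.mem_ofList ps p).mpr hp
      obtain ⟨l₁, l₂, h12⟩ := List.append_of_mem hps
      have hnd : (l₁ ++ p :: l₂).Nodup := h12 ▸ PySem.Set.nodup_ofList ps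
      have hpl₁ : p ∉ l₁ := by
        intro h
        exact (List.disjoint_of_nodup_append hnd) h (by simp)
      have hpl₂ : p ∉ l₂ := by
        have := (List.nodup_append.mp hnd).2.1
        simp at this
        exact this.1
      have hadd : PySem.Set.add (PySem.Set.ofList ps) p = PySem.Set.ofList ps := by
        simp [PySem.Set.add, PySem.Set.contains, hps]
      have hcnt : ∀ q : String × String, q ≠ p → (ps ++ [p]).count q = ps.count q := by
        intro q hq; simp [List.count_append, Ne.symm hq]
      have hmapl₁ : l₁.map (fun k => (k, ((ps ++ [p]).count k : Int)))
          = l₁.map (fun k => (k, (ps.count k : Int))) := by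
        apply List.map_congr_left; intro q hq
        rw [hcnt q (by rintro rfl; exact hpl₁ hq)]
      have hmapl₂ : l₂.map (fun k => (k, ((ps ++ [p]).count k : Int)))
          = l₂.map (fun k => (k, (ps.count k : Int))) := by
        apply List.map_congr_left; intro q hq
        rw [hcnt q (by rintro rfl; exact hpl₂ hq)]
      have hcp : ((ps ++ [p]).count p : Int) = (ps.count p : Int) + 1 := by
        simp [List.count_append]
      -- presence of p's path after its own put
      set d₀ := List.foldl pvStepB PySem.Dict.empty
          (l₁.map (fun k => (k, (ps.count k : Int)))) with hd₀
      have h1 : (pvPut d₀ p (ps.count p)).contains p.1 = true :=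
        PySem.Dict.contains_insert_self _ _ _
      have h2 : ((pvPut d₀ p (ps.count p)).getD p.1 PySem.Dict.empty).contains p.2 = true := by
        rw [pvPut, PySem.Dict.getD_insert_self]
        exact PySem.Dict.contains_insert_self _ _ _
      have hLout : p ∉ (l₂.map (fun k => (k, (ps.count k : Int)))).map Prod.fst := by
        simpa using hpl₂
      rw [hstep, hofs, hadd, h12, List.map_append, List.map_cons, hmapl₁, hmapl₂, hcp,
        List.foldl_append, List.foldl_cons, pv_stepB_eq]
      rw [ih, h12, List.map_append, List.map_cons, List.foldl_append, List.foldl_cons,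
        pv_stepB_eq]
      rw [show (pvPut d₀ (p, ((ps.count p : Int) + 1)).1 (p, ((ps.count p : Int) + 1)).2)
            = pvPut (pvPut d₀ p (ps.count p)) p ((ps.count p : Int) + 1) from
          (pv_put_put_self d₀ p (ps.count p) _).symm]
      rw [pv_fold_put _ _ _ _ hLout h1 h2]
    · -- fresh pair: the table grows by one entry (p, 1) at the end
      have hps : p ∉ PySem.Set.ofList ps := fun h => hp ((PySem.Set.mem_ofList ps p).mp h)
      have hadd : PySem.Set.add (PySem.Set.ofList ps) p = PySem.Set.ofList ps ++ [p] := by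
        simp [PySem.Set.add, PySem.Set.contains, hps]
      have hmap : (PySem.Set.ofList ps).map (fun k => (k, ((ps ++ [p]).count k : Int)))
          = (PySem.Set.ofList ps).map (fun k => (k, (ps.count k : Int))) := by
        apply List.map_congr_left; intro q hq
        have hq' : q ≠ p := by
          rintro rfl; exact hps hq
        simp [List.count_append, Ne.symm hq']
      have hcp : ((ps ++ [p]).count p : Int) = 1 := by
        have : ps.count p = 0 := List.count_eq_zero.mpr hp
        simp [List.count_append, this]
      have hc0 : (ps.count p : Int) = 0 := by
        simp [List.count_eq_zero.mpr hp]
      rw [hstep, hofs, hadd, List.map_append, List.map_cons, List.map_nil, hmap, hcp,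
        List.foldl_append, List.foldl_cons, List.foldl_nil, pv_stepB_eq, ← ih, hc0]
      rfl

-- A's enumerate loop over a suffix is a fold of pvStepA over that suffix's adjacent pairs
theorem pv_bridgeA (l : List Char) (t : List Char) (k : Nat)
    (h : l.drop k = t) (r : PySem.Dict String (PySem.Dict String Int)) :
    pvALoop l r (PySem.List.enumerate t (k : Int))
      = List.foldl pvStepA r
          ((t.zip (l.drop (k + 1))).map (fun p => (pvStr1 p.1, pvStr1 p.2))) := by
  induction t generalizing k r with
  | nil => simp [pvALoop, PySem.List.enumerate]
  | cons c t' ih =>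
    have hdrop : l.drop (k + 1) = t' := by
      rw [← List.tail_drop, h]; rfl
    have hget : PySem.List.pyGet? l ((k : Int) + 1) = t'.head? := by
      have : ((k : Int) + 1) = ((k + 1 : Nat) : Int) := by push_cast; ring
      rw [this, PySem.List.pyGet?_natCast]
      have := List.getElem?_drop (xs := l) (i := k + 1) (j := 0)
      simp only [Nat.add_zero] at this
      rw [← this, hdrop]
      cases t' <;> rfl
    show pvALoop l r ((( k : Int), c) :: PySem.List.enumerate t' ((k : Int) + 1)) = _
    cases t' with
    | nil =>
      simp [pvALoop, PySem.Chars.pyGet?, hget, hdrop]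
    | cons out t'' =>
      have hsome : PySem.List.pyGet? l ((k : Int) + 1) = some out := by
        rw [hget]; rfl
      have hcast : ((k : Int) + 1) = ((k + 1 : Nat) : Int) := by push_cast; ring
      rw [show pvALoop l r (((k : Int), c) :: PySem.List.enumerate (out :: t'') ((k : Int) + 1))
            = pvALoop l (pvStepA r (pvStr1 c, pvStr1 out))
                (PySem.List.enumerate (out :: t'') ((k : Int) + 1)) from by
          simp only [pvALoop, PySem.Chars.pyGet?, hsome, pvStepA, pvPut, pv_setdefault_insert,
            PySem.Dict.getD_setdefault_self]]
      rw [hcast, ih (k + 1) hdrop]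
      rw [hdrop, show l.drop (k + 1 + 1) = t'' from by rw [← List.tail_drop, hdrop]; rfl]
      rfl

-- ===== VERDICT (by name: the statement is the Claim_ definition above) =====
theorem get_table_with_enumerate_spec : Claim_equal_get_table_with_enumerate := by
  intro line _
  unfold Spec_get_table_with_enumerate
  show get_table_with_enumerate line = _
  have hpairs : get_table_with_enumerate_alt line
      = (((((line.toList.zip (line.toList.drop 1)).map
              (fun p => (pvStr1 p.1, pvStr1 p.2))).foldl
                (fun d p => d.insert p (d.getD p 0 + 1)) PySem.Dict.empty).items).foldl
                  pvStepB PySem.Dict.empty).items.map (fun e => (e.1, e.2.items)) := rfl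
  have hzero : PySem.List.enumerate line.toList = PySem.List.enumerate line.toList ((0 : Nat) : Int) := rfl
  rw [hpairs, PySem.Dict.foldl_insert_getD_add_one_eq_counter, PySem.Dict.items_counter]
  unfold get_table_with_enumerate
  rw [hzero, pv_bridgeA line.toList line.toList 0 (by simp) PySem.Dict.empty]
  rw [show List.drop (0 + 1) line.toList = line.toList.drop 1 from rfl]
  rw [pv_main]
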